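-- pv_equiv track=rewrite | github.com/piuspk/BTP_2024 | FSM.py | N_O_build_fsm
-- ===== SOURCE A (Python) =====
-- def find_fallback_state(sequence, index, symbol, states):
--     for i in range(index, 0, -1):
--         if sequence[:i] == sequence[index-i+1:index] + symbol:
--             return states[i]
--     return states[0]
--
-- def N_O_build_fsm(sequence):
--     n = len(sequence)
--     states = [f'S{i}' for i in range(n+1)]
--     transitions = {state: {} for state in states}
--     outputs = {state: '0' for state in states}
--
--     # Set output for the final state
--     outputs[states[-1]] = '1'
--
--     for i in range(n):
--         current_state = states[i]
--         next_state = states[i+1]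
--         char = sequence[i]
--
--         for symbol in '01':
--             if symbol == char:
--                 transitions[current_state][symbol] = next_state
--             else:
--                 fallback_state = find_fallback_state(sequence, i, symbol, states)
--                 transitions[current_state][symbol] = fallback_state
--
--     # Non-overlapping behavior: after reaching the final state, reset to the start state
--     final_state = states[-1]
--     for symbol in '01':
--         transitions[final_state][symbol] = states[0]
--
--     return states, transitions, outputs
-- ===== SOURCE B (Python) =====
-- def N_O_build_fsm(sequence):
--     n = len(sequence)
--     states = ['S%d' % i for i in range(n + 1)]
--     transitions = {}
--     outputs = {}
--     pbs = []  # lengths of the proper borders of sequence[:j], in decreasing order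
--     for j in range(n):
--         char = sequence[j]
--         trans = {}
--         for symbol in '01':
--             if symbol == char:
--                 trans[symbol] = states[j + 1]
--             else:
--                 trans[symbol] = states[0]
--                 for b in pbs:
--                     if sequence[b] == symbol:
--                         trans[symbol] = states[b + 1]
--                         break
--         transitions[states[j]] = trans
--         outputs[states[j]] = '0'
--         pbs = [b + 1 for b in pbs if sequence[b] == char] + [0]
--     transitions[states[n]] = {'0': states[0], '1': states[0]}
--     outputs[states[n]] = '1'
--     return states, transitions, outputs
-- ===== Notes on version B (the rewrite author's own statement) =====
-- stated objective: faster
-- what changed: A recomputes each fallback state by scanning all candidate prefix lengths and comparing string slices (O(n^2) per state, O(n^3) total); B instead maintains, in one pass, the list of proper-border lengths of the consumed prefix incrementally (KMP-style) so each fallback is found by a single-character scan of that list.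
import Mathlib
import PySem

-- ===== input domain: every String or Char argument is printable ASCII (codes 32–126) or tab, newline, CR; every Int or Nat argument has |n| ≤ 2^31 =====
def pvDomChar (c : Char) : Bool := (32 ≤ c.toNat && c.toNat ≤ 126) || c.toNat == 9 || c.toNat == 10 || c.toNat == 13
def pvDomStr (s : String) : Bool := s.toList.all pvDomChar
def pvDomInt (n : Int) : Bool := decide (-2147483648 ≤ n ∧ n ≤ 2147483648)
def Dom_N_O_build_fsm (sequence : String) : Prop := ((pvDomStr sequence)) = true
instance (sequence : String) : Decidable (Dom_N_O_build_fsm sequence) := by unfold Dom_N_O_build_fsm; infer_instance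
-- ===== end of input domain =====

-- B replaces A's per-state O(n^2) fallback search (rescanning all prefix lengths with string slicing)
-- by an incrementally maintained list of proper-border lengths of the consumed prefix (faster).


-- ===== PORT A =====
-- find_fallback_state: the loop 'for i in range(index, 0, -1)' (early return on the first hit);
-- returns the chosen index i (0 for the final 'return states[0]'); A then looks up states[i].
def pvFFA (s : List Char) (j : Nat) (c : Char) : Nat → Nat
  | 0 => 0
  | i+1 =>
    if s.take (i+1) = PySem.List.slice s (some ((j : Int) - (i : Int))) (some (j : Int)) ++ [c]
    then i + 1 else pvFFA s j c i

-- the body of A's 'for i in range(n)' loop (two symbols '0','1' in order; sequence[i] compared as its character)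
def pvStepA (s : List Char) (states : List String)
    (tr : PySem.Dict String (PySem.Dict String String)) (i : Nat) :
    PySem.Dict String (PySem.Dict String String) :=
  let cur := states.getD i ""
  let nxt := states.getD (i+1) ""
  let ch := s.getD i ' '
  (['0','1']).foldl (fun tr sym =>
    if sym = ch then
      tr.modify cur PySem.Dict.empty (fun inner => inner.insert (String.ofList [sym]) nxt)
    else
      tr.modify cur PySem.Dict.empty (fun inner =>
        inner.insert (String.ofList [sym]) (states.getD (pvFFA s i sym i) ""))) tr

def N_O_build_fsm (sequence : String) :
    List String × (List (String × List (String × String))) × (List (String × String)) :=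
  let s := sequence.toList
  let n := s.length
  let states : List String := (List.range (n+1)).map (fun i : Nat => "S" ++ PySem.Int.toStr (i : Int))
  let transitions0 : PySem.Dict String (PySem.Dict String String) :=
    states.foldl (fun d st => d.insert st PySem.Dict.empty) PySem.Dict.empty
  let outputs0 : PySem.Dict String String :=
    states.foldl (fun d st => d.insert st "0") PySem.Dict.empty
  let outputs := outputs0.insert ((PySem.List.pyGet? states (-1)).getD "") "1"
  let transitions1 := (List.range n).foldl (pvStepA s states) transitions0
  let transitions := (['0','1']).foldl (fun tr sym =>
      tr.modify ((PySem.List.pyGet? states (-1)).getD "") PySem.Dict.empty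
        (fun inner => inner.insert (String.ofList [sym]) (states.getD 0 ""))) transitions1
  (states, transitions.items.map (fun p => (p.1, p.2.items)), outputs.items)

-- ===== PORT B =====
-- the body of B's loop: emit the state's transition row and output, then update the border list;
-- B's dict inserts are of fresh keys in order, ported as list appends.
def pvStepB (s : List Char) (states : List String)
    (acc : List (String × List (String × String)) × List (String × String) × List Nat) (j : Nat) :
    List (String × List (String × String)) × List (String × String) × List Nat :=
  let ch := s.getD j ' '
  let trow := (['0','1']).map (fun sym =>
    (String.ofList [sym],
     if sym = ch then states.getD (j+1) ""
     else match acc.2.2.find? (fun b => s.getD b ' ' == sym) with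
          | some b => states.getD (b+1) ""
          | none => states.getD 0 ""))
  (acc.1 ++ [(states.getD j "", trow)],
   acc.2.1 ++ [(states.getD j "", "0")],
   (acc.2.2.filter (fun b => s.getD b ' ' == ch)).map (· + 1) ++ [0])

def N_O_build_fsm_alt (sequence : String) :
    List String × (List (String × List (String × String))) × (List (String × String)) :=
  let s := sequence.toList
  let n := s.length
  let states : List String := (List.range (n+1)).map (fun i : Nat => "S" ++ PySem.Int.toStr (i : Int))
  let res := (List.range n).foldl (pvStepB s states) ([], [], [])
  (states,
   res.1 ++ [(states.getD n "", [("0", states.getD 0 ""), ("1", states.getD 0 "")])],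
   res.2.1 ++ [(states.getD n "", "1")])

-- ===== PRECONDITION & SPEC =====
def Spec_N_O_build_fsm (sequence : String) (out : List String × (List (String × List (String × String))) × (List (String × String))) : Prop := out = N_O_build_fsm_alt sequence
instance (sequence : String) (out : List String × (List (String × List (String × String))) × (List (String × String))) : Decidable (Spec_N_O_build_fsm sequence out) := by unfold Spec_N_O_build_fsm; infer_instance

-- ===== CLAIM (what is proved, stated in full; the proofs are below) =====
def Claim_equal_N_O_build_fsm : Prop := ∀ (sequence : String), Dom_N_O_build_fsm sequence → Spec_N_O_build_fsm sequence (N_O_build_fsm sequence)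

-- ===== LEMMAS AND PROOFS =====

-- ----- state names: "S{i}" is injective in i -----
theorem pvTdcEq (f : Nat) : ∀ (n : Nat) (acc : List Char), n < f → 0 < n →
    Nat.toDigitsCore 10 f n acc = ((Nat.digits 10 n).map Nat.digitChar).reverse ++ acc := by
  induction f with
  | zero => intro n acc h; omega
  | succ f ih =>
    intro n acc h hn
    rw [Nat.toDigitsCore]
    rw [Nat.digits_def' (by norm_num : 1 < 10) hn]
    by_cases h10 : n / 10 = 0
    · simp only [h10, if_pos]
      simp
    · simp only [h10, ite_false]
      rw [ih (n / 10) _ (by omega) (by omega)]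
      simp

theorem pvCharsVal_toDigits (n : Nat) :
    Nat.ofDigits 10 ((Nat.toDigits 10 n).reverse.map (fun c => c.toNat - 48)) = n := by
  by_cases hn : n = 0
  · subst hn; decide
  · have h1 : Nat.toDigits 10 n = ((Nat.digits 10 n).map Nat.digitChar).reverse := by
      have := pvTdcEq (n+1) n [] (by omega) (by omega)
      simpa [Nat.toDigits] using this
    rw [h1, List.reverse_reverse, List.map_map]
    have hmap : (Nat.digits 10 n).map ((fun c => c.toNat - 48) ∘ Nat.digitChar) = Nat.digits 10 n := by
      apply List.map_congr_left ?_ |>.trans (List.map_id _)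
      intro d hd
      have hlt : d < 10 := Nat.digits_lt_base (by norm_num) hd
      interval_cases d <;> rfl
    rw [hmap, Nat.ofDigits_digits]

def pvSt (i : Nat) : String := "S" ++ PySem.Int.toStr (i : Int)

theorem pvSt_inj : Function.Injective pvSt := by
  intro i j h
  unfold pvSt at h
  have hc : ∀ k : Nat, PySem.Int.toStr (k:Int) = String.ofList (Nat.toDigits 10 k) := by
    intro k
    simp [PySem.Int.toStr, PySem.Int.toChars, Int.not_lt.mpr (Int.natCast_nonneg k)]
  rw [hc, hc] at h
  have h2 := congrArg String.toList h
  simp at h2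
  have h3 := congrArg (fun l => Nat.ofDigits 10 (l.reverse.map (fun c => c.toNat - 48))) h2
  simp only [pvCharsVal_toDigits] at h3
  exact h3

-- ----- borders of the consumed prefix, and the two fallback computations -----
def pvBorder (s : List Char) (j b : Nat) : Bool := s.take b == (s.take j).drop (j - b)
def pvPbs (s : List Char) (j : Nat) : List Nat := ((List.range j).reverse).filter (fun b => pvBorder s j b)

theorem pvBorder_zero (s : List Char) (j : Nat) : pvBorder s j 0 = true := by
  simp [pvBorder]

theorem pvTake_succ_of_lt (s : List Char) (b : Nat) (hb : b < s.length) :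
    s.take (b+1) = s.take b ++ [s[b]] := by
  rw [List.take_add_one]
  simp [List.getElem?_eq_getElem hb]

theorem pvCondIff (s : List Char) (j b : Nat) (c : Char) (hb : b < j) (hj : j ≤ s.length) :
    (s.take (b+1) = List.take b (s.drop (j - b)) ++ [c]) ↔ (pvBorder s j b = true ∧ s.getD b ' ' = c) := by
  have hbl : b < s.length := by omega
  rw [pvTake_succ_of_lt s b hbl]
  have hdt : (s.take j).drop (j - b) = List.take b (s.drop (j - b)) := by
    rw [List.drop_take]; congr 1; omega
  rw [pvBorder, ← hdt, List.getD_eq_getElem s ' ' hbl, beq_iff_eq]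
  constructor
  · intro h
    have hlen : (s.take b).length = ((s.take j).drop (j - b)).length := by
      simp; omega
    obtain ⟨h1, h2⟩ := List.append_inj h hlen
    exact ⟨h1, by simpa using h2⟩
  · rintro ⟨h1, h2⟩
    rw [← h1, h2]

theorem pvBorder_succ (s : List Char) (j b : Nat) (hb : b < j) (hj : j < s.length) :
    pvBorder s (j+1) (b+1) = (pvBorder s j b && (s.getD b ' ' == s.getD j ' ')) := by
  have hbl : b < s.length := by omega
  rw [Bool.eq_iff_iff]
  simp only [pvBorder, Bool.and_eq_true, beq_iff_eq]
  rw [pvTake_succ_of_lt s j hj, pvTake_succ_of_lt s b hbl]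
  have he : j + 1 - (b + 1) = j - b := by omega
  rw [he]
  rw [List.drop_append_of_le_length (by simp; omega)]
  rw [List.getD_eq_getElem s ' ' hbl, List.getD_eq_getElem s ' ' hj]
  constructor
  · intro h
    have hlen : (s.take b).length = ((s.take j).drop (j - b)).length := by simp; omega
    obtain ⟨h1, h2⟩ := List.append_inj h hlen
    exact ⟨h1, by simpa using h2⟩
  · rintro ⟨h1, h2⟩
    rw [h1, h2]

theorem pvPbs_succ (s : List Char) (j : Nat) (hj : j < s.length) :
    pvPbs s (j+1) = ((pvPbs s j).filter (fun b => s.getD b ' ' == s.getD j ' ')).map (· + 1) ++ [0] := by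
  unfold pvPbs
  rw [List.range_succ_eq_map, List.reverse_cons, List.filter_append]
  have h0 : List.filter (fun b => pvBorder s (j+1) b) [0] = [0] := by
    simp [pvBorder_zero]
  rw [h0]
  congr 1
  rw [← List.map_reverse, List.filter_map, List.filter_filter]
  have hc : List.filter ((fun b => pvBorder s (j+1) b) ∘ Nat.succ) (List.range j).reverse
       = List.filter (fun b => (s.getD b ' ' == s.getD j ' ') && pvBorder s j b) (List.range j).reverse := by
    apply List.filter_congr
    intro b hb
    simp only [Function.comp_apply, Nat.succ_eq_add_one]
    rw [pvBorder_succ s j b (by simpa using hb) hj, Bool.and_comm]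
  rw [hc]

theorem pvFFA_le (s : List Char) (j : Nat) (c : Char) : ∀ i, pvFFA s j c i ≤ i := by
  intro i
  induction i with
  | zero => simp [pvFFA]
  | succ i ih =>
    unfold pvFFA
    split
    · omega
    · omega

theorem pvFFA_eq (s : List Char) (j : Nat) (c : Char) :
    ∀ i, i ≤ j → j ≤ s.length →
    pvFFA s j c i = (match ((List.range i).reverse).find? (fun b => pvBorder s j b && (s.getD b ' ' == c)) with
                     | some b => b + 1 | none => 0) := by
  intro i
  induction i with
  | zero => intro _ _; simp [pvFFA]
  | succ i ih =>
    intro hij hj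
    rw [List.range_succ, List.reverse_append]
    simp only [List.reverse_cons, List.reverse_nil, List.nil_append, List.singleton_append]
    unfold pvFFA
    rw [show (j:Int) - (i:Int) = ((j-i:Nat):Int) by omega, PySem.List.slice_natCast,
        show j-(j-i) = i by omega]
    rw [List.find?_cons]
    by_cases hcond : s.take (i+1) = List.take i (s.drop (j-i)) ++ [c]
    · have hb : (pvBorder s j i && (s.getD i ' ' == c)) = true := by
        rw [Bool.and_eq_true, beq_iff_eq]
        exact (pvCondIff s j i c (by omega) hj).mp hcond
      rw [if_pos hcond, hb]
    · have hb : (pvBorder s j i && (s.getD i ' ' == c)) = false := by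
        rw [Bool.eq_false_iff]
        intro hx
        rw [Bool.and_eq_true, beq_iff_eq] at hx
        exact hcond ((pvCondIff s j i c (by omega) hj).mpr hx)
      rw [if_neg hcond, hb, ih (by omega) hj]

theorem pvFB_eq (s : List Char) (j : Nat) (c : Char) (hj : j ≤ s.length) :
    pvFFA s j c j = (match (pvPbs s j).find? (fun b => (s.getD b ' ' == c)) with
                     | some b => b + 1 | none => 0) := by
  rw [pvFFA_eq s j c j le_rfl hj, pvPbs, List.find?_filter]
  congr 1
  congr 1
  funext b
  simp [Bool.decide_and, Bool.beq_eq_decide_eq]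

-- ----- the common shape of one state's transition row -----
def pvVal (s : List Char) (j : Nat) (sym : Char) : String :=
  if sym = s.getD j ' ' then pvSt (j+1) else pvSt (pvFFA s j sym j)
def pvRow (s : List Char) (j : Nat) : List (String × String) :=
  [("0", pvVal s j '0'), ("1", pvVal s j '1')]
def pvRowD (s : List Char) (j : Nat) : PySem.Dict String String :=
  (PySem.Dict.empty.insert "0" (pvVal s j '0')).insert "1" (pvVal s j '1')

theorem pvStates_getD (n i : Nat) (h : i ≤ n) :
    ((List.range (n+1)).map pvSt).getD i "" = pvSt i :=
  PySem.List.getD_map_range pvSt (n+1) i "" (by omega)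

theorem pvStates_last (n : Nat) :
    (PySem.List.pyGet? ((List.range (n+1)).map pvSt) (-1)).getD "" = pvSt n := by
  simp [PySem.List.pyGet?, PySem.List.pyIdx?]

theorem pvMemPbs (s : List Char) (k b : Nat) (h : b ∈ pvPbs s k) : b < k := by
  unfold pvPbs at h
  rw [List.mem_filter] at h
  simpa using h.1

-- ----- B's fold -----
theorem pvTrowB (s : List Char) (n k : Nat) (hn : n = s.length) (hk : k < n) :
    (['0','1']).map (fun sym => (String.ofList [sym],
       if sym = s.getD k ' ' then ((List.range (n+1)).map pvSt).getD (k+1) ""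
       else match (pvPbs s k).find? (fun b => s.getD b ' ' == sym) with
            | some b => ((List.range (n+1)).map pvSt).getD (b+1) ""
            | none => ((List.range (n+1)).map pvSt).getD 0 "")) = pvRow s k := by
  have hone : ∀ sym : Char,
      (if sym = s.getD k ' ' then ((List.range (n+1)).map pvSt).getD (k+1) ""
       else match (pvPbs s k).find? (fun b => s.getD b ' ' == sym) with
            | some b => ((List.range (n+1)).map pvSt).getD (b+1) ""
            | none => ((List.range (n+1)).map pvSt).getD 0 "") = pvVal s k sym := by
    intro sym
    unfold pvVal
    by_cases hch : sym = s.getD k ' '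
    · rw [if_pos hch, if_pos hch, pvStates_getD n (k+1) (by omega)]
    · rw [if_neg hch, if_neg hch, pvFB_eq s k sym (by omega)]
      rcases hfind : (pvPbs s k).find? (fun b => s.getD b ' ' == sym) with _ | b
      · exact pvStates_getD n 0 (by omega)
      · have hb : b < k := pvMemPbs s k b (List.mem_of_find?_eq_some hfind)
        exact pvStates_getD n (b+1) (by omega)
  simp only [List.map, hone]
  rfl

theorem pvB_fold (s : List Char) (n : Nat) (hn : n = s.length) : ∀ k, k ≤ n →
    (List.range k).foldl (pvStepB s ((List.range (n+1)).map pvSt)) ([], [], [])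
    = ((List.range k).map (fun j => (pvSt j, pvRow s j)),
       (List.range k).map (fun j => (pvSt j, "0")),
       pvPbs s k) := by
  intro k
  induction k with
  | zero => intro _; simp [pvPbs]
  | succ k ih =>
    intro hk
    have hr : List.range (k+1) = List.range k ++ [k] := List.range_succ
    rw [hr, List.foldl_append, ih (by omega)]
    simp only [List.foldl_cons, List.foldl_nil]
    unfold pvStepB
    dsimp only
    rw [pvTrowB s n k hn (by omega), pvPbs_succ s k (by omega), pvStates_getD n k (by omega),
        List.map_append, List.map_append]
    simp

-- ----- A's dicts as positional lists -----
theorem pvKeysNodup (n : Nat) {ν : Type} (v : Nat → ν) :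
    (PySem.Dict.mk ((List.range (n+1)).map (fun j => (pvSt j, v j)))).keys.Nodup := by
  have : (PySem.Dict.mk ((List.range (n+1)).map (fun j => (pvSt j, v j)))).keys
      = (List.range (n+1)).map pvSt := by
    simp [PySem.Dict.keys, List.map_map]
  rw [this]
  exact List.Nodup.map pvSt_inj List.nodup_range

theorem pvContainsMap (n k : Nat) (hk : k ≤ n) {ν : Type} (v : Nat → ν) :
    (PySem.Dict.mk ((List.range (n+1)).map (fun j => (pvSt j, v j)))).contains (pvSt k) = true := by
  rw [PySem.Dict.contains_iff_mem_keys]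
  have : (PySem.Dict.mk ((List.range (n+1)).map (fun j => (pvSt j, v j)))).keys
      = (List.range (n+1)).map pvSt := by
    simp [PySem.Dict.keys, List.map_map]
  rw [this]
  exact List.mem_map_of_mem (by rw [List.mem_range]; omega)

theorem pvGetDMap (n k : Nat) (hk : k ≤ n) {ν : Type} (v : Nat → ν) (d0 : ν) :
    (PySem.Dict.mk ((List.range (n+1)).map (fun j => (pvSt j, v j)))).getD (pvSt k) d0 = v k := by
  apply PySem.Dict.getD_of_mem_items _ _ (pvKeysNodup n v)
  exact List.mem_map_of_mem (by rw [List.mem_range]; omega)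

theorem pvInsertMap (n k : Nat) (hk : k ≤ n) {ν : Type} (v : Nat → ν) (w : ν) :
    (PySem.Dict.mk ((List.range (n+1)).map (fun j => (pvSt j, v j)))).insert (pvSt k) w
    = PySem.Dict.mk ((List.range (n+1)).map (fun j => (pvSt j, if j = k then w else v j))) := by
  apply PySem.Dict.ext
  rw [PySem.Dict.items_insert_of_contains _ _ (pvContainsMap n k hk v)]
  simp only [List.map_map]
  apply List.map_congr_left
  intro j hj
  simp only [Function.comp_apply, beq_iff_eq]
  by_cases hjk : j = k
  · subst hjk; simp
  · rw [if_neg (fun h => hjk (pvSt_inj h)), if_neg hjk]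

theorem pvModifyMap (n k : Nat) (hk : k ≤ n) {ν : Type} (v : Nat → ν) (d0 : ν) (f : ν → ν) :
    (PySem.Dict.mk ((List.range (n+1)).map (fun j => (pvSt j, v j)))).modify (pvSt k) d0 f
    = PySem.Dict.mk ((List.range (n+1)).map (fun j => (pvSt j, if j = k then f (v k) else v j))) := by
  unfold PySem.Dict.modify
  rw [pvGetDMap n k hk v d0, pvInsertMap n k hk v (f (v k))]

theorem pvStepA_eq (s : List Char) (n : Nat) (hn : n = s.length) (k : Nat) (hk : k < n)
    (v : Nat → PySem.Dict String String) (hvk : v k = PySem.Dict.empty) :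
    pvStepA s ((List.range (n+1)).map pvSt) (PySem.Dict.mk ((List.range (n+1)).map (fun j => (pvSt j, v j)))) k
    = PySem.Dict.mk ((List.range (n+1)).map (fun j => (pvSt j, if j = k then pvRowD s k else v j))) := by
  unfold pvStepA
  simp only [List.foldl]
  rw [pvStates_getD n k (by omega)]
  have hsel : ∀ (tr : PySem.Dict String (PySem.Dict String String)) (sym : Char),
      (if sym = s.getD k ' ' then
        tr.modify (pvSt k) PySem.Dict.empty
          (fun inner => inner.insert (String.ofList [sym]) (((List.range (n+1)).map pvSt).getD (k+1) ""))
      else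
        tr.modify (pvSt k) PySem.Dict.empty
          (fun inner => inner.insert (String.ofList [sym])
            (((List.range (n+1)).map pvSt).getD (pvFFA s k sym k) "")))
      = tr.modify (pvSt k) PySem.Dict.empty
          (fun inner => inner.insert (String.ofList [sym]) (pvVal s k sym)) := by
    intro tr sym
    unfold pvVal
    by_cases hch : sym = s.getD k ' '
    · rw [if_pos hch, if_pos hch, pvStates_getD n (k+1) (by omega)]
    · rw [if_neg hch, if_neg hch,
          pvStates_getD n (pvFFA s k sym k) (le_trans (pvFFA_le s k sym k) (by omega))]
  simp only [hsel]
  rw [pvModifyMap n k (by omega) v PySem.Dict.empty]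
  rw [pvModifyMap n k (by omega) _ PySem.Dict.empty]
  congr 1
  apply List.map_congr_left
  intro j hj
  by_cases hjk : j = k
  · subst hjk
    simp [hvk, pvRowD]
  · simp [hjk]

theorem pvA_fold (s : List Char) (n : Nat) (hn : n = s.length) : ∀ k, k ≤ n →
    (List.range k).foldl (pvStepA s ((List.range (n+1)).map pvSt))
      (PySem.Dict.mk ((List.range (n+1)).map (fun j => (pvSt j, PySem.Dict.empty))))
    = PySem.Dict.mk ((List.range (n+1)).map (fun j =>
        (pvSt j, if j < k then pvRowD s j else PySem.Dict.empty))) := by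
  intro k
  induction k with
  | zero => intro _; simp
  | succ k ih =>
    intro hk
    have hr : List.range (k+1) = List.range k ++ [k] := List.range_succ
    rw [hr, List.foldl_append, ih (by omega)]
    simp only [List.foldl]
    rw [pvStepA_eq s n hn k (by omega) _ (by rw [if_neg (by omega)])]
    congr 1
    apply List.map_congr_left
    intro j hj
    by_cases hjk : j = k
    · subst hjk
      rw [if_pos rfl, if_pos (by omega)]
    · rw [if_neg hjk]
      by_cases hlt : j < k
      · rw [if_pos hlt, if_pos (by omega)]
      · rw [if_neg hlt, if_neg (by omega)]

theorem pvFoldFresh (n : Nat) {ν : Type} (w : ν) :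
    ((List.range (n+1)).map pvSt).foldl (fun d st => d.insert st w) PySem.Dict.empty
    = PySem.Dict.mk ((List.range (n+1)).map (fun j => (pvSt j, w))) := by
  apply PySem.Dict.ext
  have := PySem.Dict.items_foldl_insert_fresh ((List.range (n+1)).map pvSt) id (fun _ => w)
      PySem.Dict.empty (by intro a _; rfl)
      (by simpa using List.Nodup.map pvSt_inj List.nodup_range)
  simp only [id] at this
  rw [this]
  simp [PySem.Dict.empty, Function.comp]

theorem pvRowD_items (s : List Char) (j : Nat) : (pvRowD s j).items = pvRow s j := by
  unfold pvRowD pvRow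
  rw [PySem.Dict.items_insert_of_not_contains _ _ (by rfl),
      PySem.Dict.items_insert_of_not_contains _ _ (by rfl)]
  rfl

-- ===== VERDICT (by name: the statement is the Claim_ definition above) =====
theorem N_O_build_fsm_spec : Claim_equal_N_O_build_fsm := by
  unfold Claim_equal_N_O_build_fsm Spec_N_O_build_fsm
  intro seq _
  unfold N_O_build_fsm N_O_build_fsm_alt
  have hst : (fun i : Nat => "S" ++ PySem.Int.toStr (i:Int)) = pvSt := rfl
  dsimp only
  rw [hst]
  rw [pvFoldFresh seq.toList.length (PySem.Dict.empty : PySem.Dict String String),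
      pvFoldFresh seq.toList.length "0", pvStates_last seq.toList.length,
      pvInsertMap seq.toList.length seq.toList.length le_rfl _ "1",
      pvA_fold seq.toList seq.toList.length rfl seq.toList.length le_rfl,
      pvB_fold seq.toList seq.toList.length rfl seq.toList.length le_rfl,
      pvStates_getD seq.toList.length 0 (by omega),
      pvStates_getD seq.toList.length seq.toList.length le_rfl]
  simp only [List.foldl_cons, List.foldl_nil]
  rw [pvModifyMap seq.toList.length seq.toList.length le_rfl _ PySem.Dict.empty,
      pvModifyMap seq.toList.length seq.toList.length le_rfl _ PySem.Dict.empty]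
  have hrn : List.range (seq.toList.length+1) = List.range seq.toList.length ++ [seq.toList.length] := List.range_succ
  rw [hrn]
  simp only [Prod.mk.injEq]
  refine ⟨trivial, ?_, ?_⟩
  · simp only [List.map_append, List.map_map]
    congr 1
    · apply List.map_congr_left
      intro j hj
      rw [List.mem_range] at hj
      simp only [Function.comp_apply]
      rw [if_neg (by omega : ¬ j = seq.toList.length), if_neg (by omega : ¬ j = seq.toList.length),
          if_pos hj, pvRowD_items]
    · simp only [List.map_cons, List.map_nil, Function.comp_apply]
      simp only [if_true, lt_self_iff_false, if_false]
      rw [PySem.Dict.items_insert_of_not_contains _ _ (by rfl),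
          PySem.Dict.items_insert_of_not_contains _ _ (by rfl)]
      rfl
  · rw [List.map_append]
    congr 1
    · apply List.map_congr_left
      intro j hj
      rw [List.mem_range] at hj
      rw [if_neg (by omega)]
    · simp
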